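-- pv_equiv track=rewrite | github.com/ProtocolCHecker/astrology-api | astrology_tool.py | calculate_house_overlay_compatibility
-- ===== SOURCE A (Python) =====
-- def calculate_house_overlay_compatibility(chart1, chart2):
--     """Calculate compatibility based on house overlays"""
--     # This is a simplified version of house overlay analysis
--     # In a full implementation, we would check where each person's planets
--     # fall in the other person's houses
--
--     # For simplicity, we'll focus on key relationship houses: 1, 5, 7, 8
--     relationship_houses = [1, 5, 7, 8]
--     house_score = 60  # Base score
--
--     # Check planets in relationship houses
--     planets_in_houses1 = chart1.get("planets_in_houses", {})
--     planets_in_houses2 = chart2.get("planets_in_houses", {})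
--
--     benefics = ["Venus", "Jupiter"]
--     malefics = ["Saturn", "Mars"]
--
--     # Score adjustments based on planet placements
--     for house in relationship_houses:
--         # Person 1's planets in Person 2's houses
--         for planet in planets_in_houses1.get(str(house), []):
--             if planet in benefics:
--                 house_score += 5
--             elif planet in malefics:
--                 house_score -= 2
--
--         # Person 2's planets in Person 1's houses
--         for planet in planets_in_houses2.get(str(house), []):
--             if planet in benefics:
--                 house_score += 5
--             elif planet in malefics:
--                 house_score -= 2
--
--     # Ensure the score stays within 0-100 range
--     return max(0, min(100, house_score))
-- ===== SOURCE B (Python) =====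
-- def calculate_house_overlay_compatibility(chart1, chart2):
--     """Calculate compatibility based on house overlays"""
--     # Stage 1: tally every planet occurring in the key relationship houses
--     # of either chart into one frequency table (no benefic/malefic test here).
--     counts = {}
--     for chart in (chart1, chart2):
--         houses = chart.get("planets_in_houses", {})
--         for h in ("1", "5", "7", "8"):
--             for p in houses.get(h, []):
--                 counts[p] = counts.get(p, 0) + 1
--     # Stage 2: score from four keyed lookups into the table, in closed form.
--     score = (60
--              + 5 * (counts.get("Venus", 0) + counts.get("Jupiter", 0))
--              - 2 * (counts.get("Saturn", 0) + counts.get("Mars", 0)))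
--     return max(0, min(100, score))
-- ===== Notes on version B (the rewrite author's own statement) =====
-- stated objective: alternative
-- what changed: Replaces A's per-planet benefic/malefic membership tests and running accumulator by a frequency table (dict) built once over all planets in houses 1/5/7/8 of both charts, then a closed-form score 60 + 5*(counts[Venus]+counts[Jupiter]) - 2*(counts[Saturn]+counts[Mars]) from four keyed lookups; no membership scan remains in the traversal.
import Mathlib
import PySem

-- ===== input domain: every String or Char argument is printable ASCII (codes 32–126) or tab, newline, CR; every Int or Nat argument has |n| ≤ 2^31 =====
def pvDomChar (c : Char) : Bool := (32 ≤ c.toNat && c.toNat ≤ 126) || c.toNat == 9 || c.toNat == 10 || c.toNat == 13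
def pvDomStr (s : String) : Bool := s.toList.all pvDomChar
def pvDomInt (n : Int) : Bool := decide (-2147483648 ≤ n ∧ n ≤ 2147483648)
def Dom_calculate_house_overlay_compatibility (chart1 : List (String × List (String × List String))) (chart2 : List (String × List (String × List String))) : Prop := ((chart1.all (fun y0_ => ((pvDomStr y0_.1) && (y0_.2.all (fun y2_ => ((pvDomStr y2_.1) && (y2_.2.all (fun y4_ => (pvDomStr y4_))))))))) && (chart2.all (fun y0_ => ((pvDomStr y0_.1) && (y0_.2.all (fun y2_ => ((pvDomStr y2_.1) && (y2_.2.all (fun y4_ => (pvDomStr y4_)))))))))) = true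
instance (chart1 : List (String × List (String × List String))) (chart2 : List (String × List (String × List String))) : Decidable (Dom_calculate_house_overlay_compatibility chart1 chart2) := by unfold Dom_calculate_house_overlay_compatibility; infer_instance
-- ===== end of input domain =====

-- B replaces A's per-planet benefic/malefic membership tests and running accumulator
-- by a frequency table built once over all planets in houses 1/5/7/8 of both charts,
-- then four keyed lookups and one closed-form score (objective: alternative).

-- ===== PORT A =====
-- the body of A's inner loops: adjust the running score for one planet
def pvStep (score : Int) (planet : String) : Int :=
  if (["Venus", "Jupiter"] : List String).contains planet then score + 5
  else if (["Saturn", "Mars"] : List String).contains planet then score - 2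
  else score

def calculate_house_overlay_compatibility (chart1 : List (String × List (String × List String))) (chart2 : List (String × List (String × List String))) : Int :=
  let relationship_houses : List Int := [1, 5, 7, 8]
  let planets_in_houses1 := PySem.Dict.getD (PySem.Dict.mk chart1) "planets_in_houses" []
  let planets_in_houses2 := PySem.Dict.getD (PySem.Dict.mk chart2) "planets_in_houses" []
  let house_score : Int :=
    relationship_houses.foldl (fun score house =>
      let score := (PySem.Dict.getD (PySem.Dict.mk planets_in_houses1) (PySem.Int.toStr house) []).foldl pvStep score
      (PySem.Dict.getD (PySem.Dict.mk planets_in_houses2) (PySem.Int.toStr house) []).foldl pvStep score) 60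
  max 0 (min 100 house_score)

-- ===== PORT B =====
def calculate_house_overlay_compatibility_alt (chart1 : List (String × List (String × List String))) (chart2 : List (String × List (String × List String))) : Int :=
  -- stage 1: the frequency table (counts[p] = counts.get(p, 0) + 1)
  let counts : PySem.Dict String Int :=
    ([chart1, chart2]).foldl (fun counts chart =>
      let houses := PySem.Dict.getD (PySem.Dict.mk chart) "planets_in_houses" []
      (["1", "5", "7", "8"] : List String).foldl (fun counts h =>
        (PySem.Dict.getD (PySem.Dict.mk houses) h []).foldl
          (fun counts p => counts.insert p (counts.getD p 0 + 1)) counts) counts)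
      PySem.Dict.empty
  -- stage 2: closed-form score from four keyed lookups
  let score : Int := 60 + 5 * (counts.getD "Venus" 0 + counts.getD "Jupiter" 0)
                        - 2 * (counts.getD "Saturn" 0 + counts.getD "Mars" 0)
  max 0 (min 100 score)

-- ===== PRECONDITION & SPEC =====
def Spec_calculate_house_overlay_compatibility (chart1 : List (String × List (String × List String))) (chart2 : List (String × List (String × List String))) (out : Int) : Prop := out = calculate_house_overlay_compatibility_alt chart1 chart2
instance (chart1 : List (String × List (String × List String))) (chart2 : List (String × List (String × List String))) (out : Int) : Decidable (Spec_calculate_house_overlay_compatibility chart1 chart2 out) := by unfold Spec_calculate_house_overlay_compatibility; infer_instance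

-- ===== CLAIM (what is proved, stated in full; the proofs are below) =====
def Claim_equal_calculate_house_overlay_compatibility : Prop := ∀ (chart1 : List (String × List (String × List String))) (chart2 : List (String × List (String × List String))), Dom_calculate_house_overlay_compatibility chart1 chart2 → Spec_calculate_house_overlay_compatibility chart1 chart2 (calculate_house_overlay_compatibility chart1 chart2)

-- ===== LEMMAS AND PROOFS =====

-- folding A's step over a list adds 5 per Venus/Jupiter and subtracts 2 per Saturn/Mars
theorem pvStep_foldl (l : List String) (s : Int) :
    l.foldl pvStep s =
      s + 5 * (l.count "Venus" : Int) + 5 * (l.count "Jupiter" : Int)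
        - 2 * (l.count "Saturn" : Int) - 2 * (l.count "Mars" : Int) := by
  induction l generalizing s with
  | nil => simp
  | cons x xs ih =>
    simp only [List.foldl_cons, ih, pvStep, List.contains_cons, List.count_cons]
    by_cases h1 : x == "Venus" <;> by_cases h2 : x == "Jupiter" <;>
      by_cases h3 : x == "Saturn" <;> by_cases h4 : x == "Mars" <;>
      simp_all <;> push_cast <;> ring

-- ===== VERDICT (by name: the statement is the Claim_ definition above) =====
theorem calculate_house_overlay_compatibility_spec : Claim_equal_calculate_house_overlay_compatibility := by
  intro chart1 chart2 _
  unfold Spec_calculate_house_overlay_compatibility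
  unfold calculate_house_overlay_compatibility calculate_house_overlay_compatibility_alt
  have e1 : PySem.Int.toStr 1 = "1" := by decide
  have e5 : PySem.Int.toStr 5 = "5" := by decide
  have e7 : PySem.Int.toStr 7 = "7" := by decide
  have e8 : PySem.Int.toStr 8 = "8" := by decide
  simp only [List.foldl_cons, List.foldl_nil, pvStep_foldl, e1, e5, e7, e8,
    PySem.Dict.getD_foldl_insert_add_one, PySem.Dict.getD_empty]
  push_cast
  ring
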